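-- pv_equiv track=rewrite | github.com/Schepetova/Python_Homework | test_3.py | find_in_different_registers
-- ===== SOURCE A (Python) =====
-- def find_in_different_registers(words):
--     # Создаем множество для хранения уникальных слов в нижнем регистре
--     unique_words = set()
--
--     # Создаем множество для хранения слов, у которых есть дубликаты по регистру
--     duplicate_words = set()
--
--     for word in words:
--         # Приводим слово к нижнему регистру для проверки дубликатов
--         lower_word = word.lower()
--
--         if lower_word in unique_words:
--             # Если слово уже находится в множестве unique_words, то добавляем его в множество duplicate_words
--             duplicate_words.add(lower_word)
--         else:
--             # Если слово не является дубликатом, добавляем его в множество unique_words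
--             unique_words.add(lower_word)
--
--     # Удаляем из unique_words все слова, которые есть в duplicate_words
--     unique_words -= duplicate_words
--
--     # Возвращаем отсортированный список уникальных слов в нижнем регистре
--     return sorted(list(unique_words))
-- ===== SOURCE B (Python) =====
-- def find_in_different_registers(words):
--     # Sort the lowercased words first, then scan adjacent runs and keep the
--     # keys whose run has length 1; the output is produced already sorted,
--     # so no sets/dicts and no final sort of a filtered collection are needed.
--     lows = sorted(w.lower() for w in words)
--     result = []
--     i = 0
--     n = len(lows)
--     while i < n:
--         j = i
--         while j < n and lows[j] == lows[i]:
--             j += 1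
--         if j - i == 1:
--             result.append(lows[i])
--         i = j
--     return result
-- ===== Notes on version B (the rewrite author's own statement) =====
-- stated objective: alternative
-- what changed: Replaces A's hash-set duplicate tracking plus set subtraction plus final sort by sort-first-then-scan: sort the lowercased words, then one linear scan over adjacent equal runs keeps exactly the length-1 runs, emitting the result already in sorted order.
import Mathlib
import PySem

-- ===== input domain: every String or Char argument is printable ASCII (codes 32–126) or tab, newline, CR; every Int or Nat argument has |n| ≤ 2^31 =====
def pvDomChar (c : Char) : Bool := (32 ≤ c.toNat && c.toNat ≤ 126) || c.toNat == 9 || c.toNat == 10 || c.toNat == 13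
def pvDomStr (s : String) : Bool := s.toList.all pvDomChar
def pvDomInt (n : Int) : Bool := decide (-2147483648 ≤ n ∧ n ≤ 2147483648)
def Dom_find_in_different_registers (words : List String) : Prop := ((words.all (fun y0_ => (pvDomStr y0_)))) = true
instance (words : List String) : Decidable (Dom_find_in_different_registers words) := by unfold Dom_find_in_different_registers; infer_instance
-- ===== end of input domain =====

-- B replaces A's two-set duplicate tracking, set subtraction and final sort by
-- sort-the-lowercased-words-first, then a linear scan over adjacent equal runs
-- keeping the length-1 runs (alternative algorithm, output produced pre-sorted).

-- ===== PORT A =====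
def find_in_different_registers (words : List String) : List String :=
  let st := words.foldl
    (fun (s : PySem.Set String × PySem.Set String) word =>
      let lower_word := PySem.Str.lower word
      if PySem.Set.contains s.1 lower_word then
        (s.1, PySem.Set.add s.2 lower_word)
      else
        (PySem.Set.add s.1 lower_word, s.2))
    (PySem.Set.empty, PySem.Set.empty)
  PySem.List.sorted (PySem.Set.diff st.1 st.2) (fun x => x) false

-- ===== PORT B =====
-- B's inner while loop advances j over the run of elements equal to lows[i];
-- on a list that is span (· == x): the run is x :: takeWhile, the rest is dropWhile.
def pvRunScan : List String → List String
  | [] => []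
  | x :: xs =>
    let run := xs.takeWhile (fun y => y == x)
    let rest := xs.dropWhile (fun y => y == x)
    if run.isEmpty then x :: pvRunScan rest else pvRunScan rest
termination_by l => l.length
decreasing_by
  all_goals simp only [List.length_cons]
  all_goals exact Nat.lt_succ_of_le (List.length_dropWhile_le _ _)

def find_in_different_registers_alt (words : List String) : List String :=
  pvRunScan (PySem.List.sorted (words.map PySem.Str.lower) (fun x => x) false)

-- ===== PRECONDITION & SPEC =====
def Spec_find_in_different_registers (words : List String) (out : List String) : Prop := out = find_in_different_registers_alt words
instance (words : List String) (out : List String) : Decidable (Spec_find_in_different_registers words out) := by unfold Spec_find_in_different_registers; infer_instance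

-- ===== CLAIM (what is proved, stated in full; the proofs are below) =====
def Claim_equal_find_in_different_registers : Prop := ∀ (words : List String), Dom_find_in_different_registers words → Spec_find_in_different_registers words (find_in_different_registers words)

-- ===== LEMMAS AND PROOFS =====

-- A's loop, first component: it is just set(lowered prefix).
theorem pvA_fst (l : List String) (u d : PySem.Set String) :
    (l.foldl (fun (s : PySem.Set String × PySem.Set String) x =>
        if PySem.Set.contains s.1 x then (s.1, PySem.Set.add s.2 x)
        else (PySem.Set.add s.1 x, s.2)) (u, d)).1
      = l.foldl PySem.Set.add u := by
  induction l generalizing u d with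
  | nil => rfl
  | cons a l ih =>
    simp only [List.foldl_cons]
    by_cases h : PySem.Set.contains u a = true
    · rw [if_pos h, ih, PySem.Set.add_of_mem ((PySem.Set.contains_iff u a).mp h)]
    · rw [if_neg h, ih]

-- A's loop, second component: x lands in duplicate_words iff it was already there,
-- or it was in unique_words and occurs in l, or it occurs at least twice in l.
theorem pvA_snd (l : List String) (u d : PySem.Set String) (x : String) :
    x ∈ (l.foldl (fun (s : PySem.Set String × PySem.Set String) y =>
        if PySem.Set.contains s.1 y then (s.1, PySem.Set.add s.2 y)
        else (PySem.Set.add s.1 y, s.2)) (u, d)).2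
      ↔ x ∈ d ∨ (x ∈ u ∧ x ∈ l) ∨ 2 ≤ l.count x := by
  induction l generalizing u d with
  | nil => simp
  | cons a l ih =>
    simp only [List.foldl_cons, List.count_cons]
    by_cases h : PySem.Set.contains u a = true
    · have ha : a ∈ u := (PySem.Set.contains_iff u a).mp h
      rw [if_pos h, ih]
      simp only [PySem.Set.mem_add, List.mem_cons]
      by_cases hx : a = x
      · subst hx; simp [ha]
      · simp [hx, Ne.symm hx]
    · have ha : a ∉ u := fun hm => h ((PySem.Set.contains_iff u a).mpr hm)
      rw [if_neg h, ih]
      simp only [PySem.Set.mem_add, List.mem_cons]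
      by_cases hx : a = x
      · subst hx
        have hcl : a ∈ l ↔ 0 < l.count a := List.count_pos_iff.symm
        simp only [ha, false_and, false_or, or_true, beq_self_eq_true, if_true]
        by_cases hd : a ∈ d
        · simp [hd]
        · simp only [hd, false_or]
          rw [hcl]
          simp only [true_and]
          constructor
          · rintro (h | h) <;> omega
          · intro h; left; omega
      · simp [hx, Ne.symm hx]


theorem pvRunScan_subset (l : List String) : ∀ z ∈ pvRunScan l, z ∈ l := by
  induction l using pvRunScan.induct with
  | case1 => intro z hz; simp [pvRunScan] at hz
  | case2 x xs run rest hrun ih =>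
    intro z hz
    rw [pvRunScan] at hz
    rw [if_pos hrun] at hz
    rcases List.mem_cons.mp hz with h | h
    · simp [h]
    · exact List.mem_cons_of_mem _ ((List.dropWhile_sublist _).mem (ih z h))
  | case3 x xs run rest hrun ih =>
    intro z hz
    rw [pvRunScan] at hz
    rw [if_neg hrun] at hz
    exact List.mem_cons_of_mem _ ((List.dropWhile_sublist _).mem (ih z hz))

theorem pvRest_gt (x : String) (xs : List String) (hs : (x :: xs).Pairwise (· ≤ ·)) :
    ∀ y ∈ xs.dropWhile (fun y => y == x), x < y := by
  intro y hy
  have hle : x ≤ y := (List.pairwise_cons.mp hs).1 y ((List.dropWhile_sublist _).mem hy)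
  rcases eq_or_lt_of_le hle with heq | hlt
  · exfalso
    have hpw : (xs.dropWhile (fun y => y == x)).Pairwise (· ≤ ·) :=
      List.Pairwise.sublist (List.dropWhile_sublist _) (List.pairwise_cons.mp hs).2
    cases hd : xs.dropWhile (fun y => y == x) with
    | nil => rw [hd] at hy; simp at hy
    | cons z t =>
      have hz : ¬ ((z == x) = true) := by
        have := List.head_dropWhile_not (p := fun y => y == x) (l := xs) (by rw [hd]; simp)
        simpa [hd] using this
      have hzx : z ≠ x := by simpa using hz
      rw [hd] at hy hpw
      have hxz : x ≤ z := (List.pairwise_cons.mp hs).1 z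
        ((List.dropWhile_sublist _).mem (hd ▸ List.mem_cons_self))
      rcases List.mem_cons.mp hy with h | h
      · exact hzx (by rw [← h, heq])
      · have hzy : z ≤ y := (List.pairwise_cons.mp hpw).1 y h
        exact hzx (le_antisymm (by rw [heq]; exact hzy) hxz)
  · exact hlt

theorem pvRun_all_eq (x : String) (xs : List String) :
    ∀ y ∈ xs.takeWhile (fun y => y == x), y = x := by
  intro y hy
  simpa using List.mem_takeWhile_imp hy

theorem pvRunScan_spec (l : List String) (hs : l.Pairwise (· ≤ ·)) :
    (∀ x, x ∈ pvRunScan l ↔ l.count x = 1) ∧ (pvRunScan l).Pairwise (· < ·) := by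
  induction l using pvRunScan.induct with
  | case1 => simp [pvRunScan]
  | case2 x xs run rest hrun ih =>
    have hsx := (List.pairwise_cons.mp hs).2
    have hrest : (xs.dropWhile (fun y => y == x)).Pairwise (· ≤ ·) :=
      List.Pairwise.sublist (List.dropWhile_sublist _) hsx
    obtain ⟨ihm, ihp⟩ := ih hrest
    simp only [show rest = xs.dropWhile (fun y => y == x) from rfl] at ihm ihp
    have hgt := pvRest_gt x xs hs
    have htw : xs.takeWhile (fun y => y == x) = [] := List.isEmpty_iff.mp hrun
    have hxs : xs = xs.dropWhile (fun y => y == x) := by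
      conv_lhs => rw [← List.takeWhile_append_dropWhile (p := fun y => y == x) (l := xs)]
      rw [htw]; rfl
    have heq : pvRunScan (x :: xs) = x :: pvRunScan (xs.dropWhile (fun y => y == x)) := by
      rw [pvRunScan, if_pos hrun]
    constructor
    · intro z
      rw [heq, List.mem_cons, List.count_cons, ihm]
      by_cases hzx : z = x
      · subst hzx
        have h0 : xs.count z = 0 := by
          rw [hxs, List.count_eq_zero]
          intro hm; exact absurd (hgt z hm) (lt_irrefl z)
        rw [← hxs]
        simp [h0]
      · have hne : ¬ (x = z) := fun h => hzx h.symm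
        rw [← hxs]
        simp [hzx, hne]
    · rw [heq]
      refine List.pairwise_cons.mpr ⟨?_, ihp⟩
      intro y hy
      exact hgt y (pvRunScan_subset _ y hy)
  | case3 x xs run rest hrun ih =>
    have hsx := (List.pairwise_cons.mp hs).2
    have hrest : (xs.dropWhile (fun y => y == x)).Pairwise (· ≤ ·) :=
      List.Pairwise.sublist (List.dropWhile_sublist _) hsx
    obtain ⟨ihm, ihp⟩ := ih hrest
    simp only [show rest = xs.dropWhile (fun y => y == x) from rfl] at ihm ihp
    have hgt := pvRest_gt x xs hs
    have heq : pvRunScan (x :: xs) = pvRunScan (xs.dropWhile (fun y => y == x)) := by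
      rw [pvRunScan, if_neg hrun]
    have hxs : xs = xs.takeWhile (fun y => y == x) ++ xs.dropWhile (fun y => y == x) :=
      (List.takeWhile_append_dropWhile (p := fun y => y == x) (l := xs)).symm
    have hrl : 1 ≤ (xs.takeWhile (fun y => y == x)).length := by
      cases hc : xs.takeWhile (fun y => y == x) with
      | nil => exact absurd (List.isEmpty_iff.mpr hc) hrun
      | cons a t => simp
    refine ⟨fun z => ?_, by rw [heq]; exact ihp⟩
    rw [heq, ihm]
    by_cases hzx : z = x
    · subst hzx
      have h0 : (xs.dropWhile (fun y => y == z)).count z = 0 := by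
        rw [List.count_eq_zero]
        intro hm; exact absurd (hgt z hm) (lt_irrefl z)
      have hrc : (xs.takeWhile (fun y => y == z)).count z
          = (xs.takeWhile (fun y => y == z)).length := by
        rw [List.count_eq_length]
        intro b hb; exact (pvRun_all_eq z xs b hb).symm
      constructor
      · intro h1
        exfalso
        have : z ∈ xs.dropWhile (fun y => y == z) := List.count_pos_iff.mp (by omega)
        exact absurd (hgt z this) (lt_irrefl z)
      · intro hmem
        exfalso
        rw [List.count_cons_self] at hmem
        rw [hxs, List.count_append, hrc, h0] at hmem
        omega
    · have hne : ¬ (x = z) := fun h => hzx h.symm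
      have hrc0 : (xs.takeWhile (fun y => y == x)).count z = 0 := by
        rw [List.count_eq_zero]
        intro hb; exact hzx (pvRun_all_eq x xs z hb)
      rw [List.count_cons_of_ne (by exact fun h => hzx h.symm) , hxs, List.count_append, hrc0]
      simp

theorem find_in_different_registers_eq (words : List String) :
    find_in_different_registers words = find_in_different_registers_alt words := by
  unfold find_in_different_registers find_in_different_registers_alt
  set L := words.map PySem.Str.lower with hL
  have hA1 : ∀ (u d : PySem.Set String),
      words.foldl (fun (s : PySem.Set String × PySem.Set String) word =>
        if PySem.Set.contains s.1 (PySem.Str.lower word) then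
          (s.1, PySem.Set.add s.2 (PySem.Str.lower word))
        else (PySem.Set.add s.1 (PySem.Str.lower word), s.2)) (u, d)
      = L.foldl (fun (s : PySem.Set String × PySem.Set String) y =>
        if PySem.Set.contains s.1 y then (s.1, PySem.Set.add s.2 y)
        else (PySem.Set.add s.1 y, s.2)) (u, d) := by
    intro u d; rw [hL, List.foldl_map]
  simp only [hA1]
  set S := PySem.List.sorted L (fun x => x) false with hS
  have hperm : S.Perm L := PySem.List.sorted_perm L _ false
  have hpw : S.Pairwise (· ≤ ·) := PySem.List.sorted_pairwise L (fun x => x)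
  obtain ⟨hmem, hlt⟩ := pvRunScan_spec S hpw
  apply PySem.List.sorted_eq_of_perm_of_pairwise_lt
  · set st := L.foldl (fun (s : PySem.Set String × PySem.Set String) y =>
        if PySem.Set.contains s.1 y then (s.1, PySem.Set.add s.2 y)
        else (PySem.Set.add s.1 y, s.2)) (PySem.Set.empty, PySem.Set.empty) with hst
    have h1 : st.1 = PySem.Set.ofList L := by rw [hst, pvA_fst]; rfl
    have hnd : (PySem.Set.diff st.1 st.2).Nodup := by
      rw [h1]; exact PySem.Set.nodup_diff _ _ (PySem.Set.nodup_ofList L)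
    have hnd2 : (pvRunScan S).Nodup := List.Pairwise.imp (fun h => ne_of_lt h) hlt
    rw [List.perm_ext_iff_of_nodup hnd2 hnd]
    intro x
    rw [hmem, PySem.Set.mem_diff, h1, hst, pvA_snd, PySem.Set.mem_ofList]
    have hc : S.count x = L.count x := hperm.count_eq x
    have hm : x ∈ L ↔ 0 < L.count x := List.count_pos_iff.symm
    rw [hc, hm]
    constructor
    · intro h
      refine ⟨by omega, ?_⟩
      rintro (h' | ⟨h', -⟩ | h')
      · simp [PySem.Set.empty] at h'
      · simp [PySem.Set.empty] at h'
      · omega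
    · rintro ⟨h1', h2'⟩
      have : ¬ 2 ≤ L.count x := fun hh => h2' (Or.inr (Or.inr hh))
      omega
  · exact hlt

-- ===== VERDICT (by name: the statement is the Claim_ definition above) =====
theorem find_in_different_registers_spec : Claim_equal_find_in_different_registers := by
  intro words _
  exact find_in_different_registers_eq words
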